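-- pv_equiv track=rewrite | github.com/tatsu1207/microbiome-dashboard | app/pipeline/detect.py | _cigar_ref_length
-- ===== SOURCE A (Python) =====
-- def _cigar_ref_length(cigar: str) -> int:
--     """Calculate reference-consuming length from a CIGAR string."""
--     length = 0
--     num = ""
--     for ch in cigar:
--         if ch.isdigit():
--             num += ch
--         else:
--             if ch in "MDN=X":  # reference-consuming operations
--                 length += int(num)
--             num = ""
--     return length if length > 0 else 1
-- ===== SOURCE B (Python) =====
-- def _cigar_ref_length(cigar: str) -> int:
--     """Calculate reference-consuming length from a CIGAR string.
--
--     Tokenize first into (digit-run, op) pairs, then sum the counts of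
--     reference-consuming ops (parse-then-sum instead of a char state machine).
--     """
--     tokens = []
--     i, n = 0, len(cigar)
--     while i < n:
--         j = i
--         while j < n and cigar[j].isdigit():
--             j += 1
--         if j < n:
--             tokens.append((cigar[i:j], cigar[j]))
--         i = j + 1
--     total = sum(int(num) for num, op in tokens if op in "MDN=X")
--     return total if total > 0 else 1
-- ===== Notes on version B (the rewrite author's own statement) =====
-- stated objective: alternative
-- what changed: B tokenizes the CIGAR string into (digit-run, op) pairs first and then sums the reference-consuming counts, instead of A's single char-by-char state machine with a running digit accumulator.
import Mathlib
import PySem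

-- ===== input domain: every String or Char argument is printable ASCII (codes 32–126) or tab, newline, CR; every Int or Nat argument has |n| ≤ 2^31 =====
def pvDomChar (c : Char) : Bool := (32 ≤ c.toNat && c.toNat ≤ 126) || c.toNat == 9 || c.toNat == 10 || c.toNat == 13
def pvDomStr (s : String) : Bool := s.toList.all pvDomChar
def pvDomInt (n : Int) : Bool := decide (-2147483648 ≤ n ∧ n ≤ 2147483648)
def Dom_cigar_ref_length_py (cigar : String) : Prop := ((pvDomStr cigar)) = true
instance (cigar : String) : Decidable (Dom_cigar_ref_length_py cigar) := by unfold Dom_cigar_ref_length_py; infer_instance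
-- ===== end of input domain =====

-- B tokenizes the string into (digit-run, op) pairs first and then sums the reference-consuming
-- counts, instead of A's char-by-char state machine (objective: alternative decomposition).

-- ===== PORT A =====
-- one loop step of A: state = (length, num); 'ch in "MDN=X"' for a single char = list membership;
-- int(num) → PySem.Int.ofChars?; inside Pre_ num is a nonempty digit run so ofChars? is some
-- (outside Pre_ Python raises ValueError; .getD 0 only supplies a total value there)
def cigarStepA (st : Int × List Char) (ch : Char) : Int × List Char :=
  if PySem.Chars.isdigit ch then (st.1, st.2 ++ [ch])
  else if ("MDN=X".toList).contains ch then
    (st.1 + (PySem.Int.ofChars? st.2).getD 0, [])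
  else (st.1, [])

def cigar_ref_length_py (cigar : String) : Int :=
  let st := cigar.toList.foldl cigarStepA (0, ([] : List Char))
  if st.1 > 0 then st.1 else 1

-- ===== PORT B =====
-- the inner 'while j < n and cigar[j].isdigit()' scan: (digit prefix, rest)
def spanDigits : List Char → List Char × List Char
  | [] => ([], [])
  | c :: cs =>
    if PySem.Chars.isdigit c then
      let p := spanDigits cs
      (c :: p.1, p.2)
    else ([], c :: cs)

theorem spanDigits_snd_length (l : List Char) : (spanDigits l).2.length ≤ l.length := by
  induction l with
  | nil => simp [spanDigits]
  | cons c cs ih =>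
    simp only [spanDigits]
    split
    · exact le_trans ih (by simp)
    · simp

-- the outer while loop of B, producing the token list
def tokenizeCigar : List Char → List (List Char × Char)
  | [] => []
  | c :: cs =>
    if PySem.Chars.isdigit c then
      let p := spanDigits cs
      match h : p.2 with
      | [] => []
      | op :: rest => (c :: p.1, op) :: tokenizeCigar rest
    else (([] : List Char), c) :: tokenizeCigar cs
termination_by l => l.length
decreasing_by
  · have := spanDigits_snd_length cs
    rw [h] at this
    simp at this ⊢
    omega
  · simp

-- sum(int(num) for num, op in tokens if op in "MDN=X")
def cigarTokStep (acc : Int) (t : List Char × Char) : Int :=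
  if ("MDN=X".toList).contains t.2 then acc + (PySem.Int.ofChars? t.1).getD 0 else acc

def cigar_ref_length_py_alt (cigar : String) : Int :=
  let total := (tokenizeCigar cigar.toList).foldl cigarTokStep 0
  if total > 0 then total else 1

-- ===== PRECONDITION & SPEC =====
-- Pre_ excludes exactly the inputs where the Python A raises ValueError: a reference-consuming
-- op character not immediately preceded by a digit makes A call int on an empty accumulator.
-- B raises ValueError on exactly those inputs as well.
def Pre_cigar_ref_length_py (cigar : String) : Prop :=
  ∀ i < cigar.toList.length,
    ("MDN=X".toList).contains (cigar.toList.getD i ' ') = true →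
      0 < i ∧ PySem.Chars.isdigit (cigar.toList.getD (i - 1) ' ') = true

instance (cigar : String) : Decidable (Pre_cigar_ref_length_py cigar) := by
  unfold Pre_cigar_ref_length_py; infer_instance

def pvWitness_cigar_ref_length_py : String := "10M2I3D"

def Spec_cigar_ref_length_py (cigar : String) (out : Int) : Prop := out = cigar_ref_length_py_alt cigar
instance (cigar : String) (out : Int) : Decidable (Spec_cigar_ref_length_py cigar out) := by unfold Spec_cigar_ref_length_py; infer_instance

-- ===== CLAIM (what is proved, stated in full; the proofs are below) =====
def Claim_equal_cigar_ref_length_py : Prop := ∀ (cigar : String), Dom_cigar_ref_length_py cigar → Pre_cigar_ref_length_py cigar → Spec_cigar_ref_length_py cigar (cigar_ref_length_py cigar)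

-- ===== LEMMAS AND PROOFS =====

theorem spanDigits_append (l : List Char) : (spanDigits l).1 ++ (spanDigits l).2 = l := by
  induction l with
  | nil => simp [spanDigits]
  | cons c cs ih =>
    simp only [spanDigits]
    split
    · simpa using ih
    · simp

theorem spanDigits_fst_digits (l : List Char) :
    ∀ c ∈ (spanDigits l).1, PySem.Chars.isdigit c = true := by
  induction l with
  | nil => simp [spanDigits]
  | cons c cs ih =>
    simp only [spanDigits]
    split
    · intro d hd
      rcases List.mem_cons.mp hd with h | h
      · subst h; assumption
      · exact ih d h
    · simp

theorem spanDigits_snd_head (l : List Char) (op : Char) (rest : List Char)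
    (h : (spanDigits l).2 = op :: rest) : PySem.Chars.isdigit op = false := by
  induction l with
  | nil => simp [spanDigits] at h
  | cons c cs ih =>
    simp only [spanDigits] at h
    split at h
    · exact ih h
    · rename_i hnd
      cases h
      simpa using hnd

-- folding A's step over a run of digits only appends to num
theorem foldA_digits (ds : List Char) (hds : ∀ c ∈ ds, PySem.Chars.isdigit c = true) :
    ∀ (len : Int) (acc : List Char),
      List.foldl cigarStepA (len, acc) ds = (len, acc ++ ds) := by
  induction ds with
  | nil => simp
  | cons d ds ih =>
    intro len acc
    have hd : PySem.Chars.isdigit d = true := hds d (by simp)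
    have : cigarStepA (len, acc) d = (len, acc ++ [d]) := by
      simp [cigarStepA, hd]
    rw [List.foldl_cons, this, ih (fun c hc => hds c (by simp [hc]))]
    simp

-- the heart of the equivalence: A's loop from (len, "") computes B's fold over the tokens
theorem loop_eq_tokens (l : List Char) :
    ∀ len : Int,
      (List.foldl cigarStepA (len, ([] : List Char)) l).1 =
        List.foldl cigarTokStep len (tokenizeCigar l) := by
  match l with
  | [] => intro len; simp [tokenizeCigar]
  | c :: cs =>
    intro len
    by_cases hc : PySem.Chars.isdigit c = true
    · -- digit: c starts a digit run; split cs at the end of the run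
      have hsplit := spanDigits_append cs
      have hstep : cigarStepA (len, ([] : List Char)) c = (len, [c]) := by
        simp [cigarStepA, hc]
      rw [List.foldl_cons, hstep]
      conv_lhs => rw [← hsplit, List.foldl_append]
      rw [foldA_digits (spanDigits cs).1 (spanDigits_fst_digits cs) len [c]]
      conv_rhs => rw [tokenizeCigar.eq_def]
      simp only [hc, if_true]
      split
      · rename_i heq
        rw [heq]
        simp
      · rename_i op rest heq
        rw [heq, List.foldl_cons]
        have hop : PySem.Chars.isdigit op = false := spanDigits_snd_head cs op rest heq
        have hstep2 : cigarStepA (len, [c] ++ (spanDigits cs).1) op =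
            (cigarTokStep len (c :: (spanDigits cs).1, op), []) := by
          simp only [cigarStepA, cigarTokStep, hop, Bool.false_eq_true, if_false]
          split_ifs <;> rfl
        rw [hstep2, loop_eq_tokens rest (cigarTokStep len (c :: (spanDigits cs).1, op))]
        simp
    · -- non-digit: an op with empty num, token ([], c)
      have hstep : cigarStepA (len, ([] : List Char)) c = (cigarTokStep len ([], c), []) := by
        simp only [cigarStepA, cigarTokStep]
        rw [if_neg (by simpa using hc)]
        split_ifs <;> rfl
      rw [List.foldl_cons, hstep, loop_eq_tokens cs (cigarTokStep len ([], c))]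
      conv_rhs => rw [tokenizeCigar.eq_def]
      simp only [Bool.not_eq_true] at hc
      simp only [hc, Bool.false_eq_true, if_false]
      simp
termination_by l.length
decreasing_by
  all_goals first
  | (rename_i heq
     have h1 := spanDigits_snd_length cs
     rw [heq] at h1
     simp at h1 ⊢
     omega)
  | simp

-- ===== VERDICT (by name: the statement is the Claim_ definition above) =====
theorem cigar_ref_length_py_spec : Claim_equal_cigar_ref_length_py := by
  intro cigar _ _
  simp only [Spec_cigar_ref_length_py, cigar_ref_length_py, cigar_ref_length_py_alt,
    loop_eq_tokens]
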